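-- pv_equiv track=rewrite | github.com/quanghia24/bittorrent-like-app | client-side/node.py | extract_pieces
-- ===== SOURCE A (Python) =====
-- def extract_pieces(payload):
--     bitfield_pieces = set([])
--     # for every bytes value in payload check for its bits
--     i = 0
--     for byte_value in (payload):
--         for j in range(8):
--             # check if jth bit is set
--             if((byte_value >> j) & 1):
--                 piece_number = i * 8 + 7 - j
--                 bitfield_pieces.add(piece_number)
--         i= i+1
--     # return the extracted bitfield pieces
--     return bitfield_pieces
-- ===== SOURCE B (Python) =====
-- def extract_pieces(payload):
--     # Table-driven: build once, by dynamic programming on v >> 1, a 256-entry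
--     # table OFF where OFF[v] lists the piece-offsets (7 - bit index, LSB first)
--     # of byte v; then one flat lookup pass over the payload, no per-bit loop.
--     OFF = [[]]
--     for v in range(1, 256):
--         OFF.append(([7] if v & 1 else []) + [o - 1 for o in OFF[v >> 1]])
--     return {8 * i + o for i, b in enumerate(payload) for o in OFF[b & 0xFF]}
-- ===== Notes on version B (the rewrite author's own statement) =====
-- stated objective: faster
-- what changed: Replaces A's nested per-byte 8-bit shift-and-test loop with a 256-entry lookup table of per-byte piece-offset lists, built once by dynamic programming on v >> 1, followed by a single flat lookup pass over the payload.
import Mathlib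
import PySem

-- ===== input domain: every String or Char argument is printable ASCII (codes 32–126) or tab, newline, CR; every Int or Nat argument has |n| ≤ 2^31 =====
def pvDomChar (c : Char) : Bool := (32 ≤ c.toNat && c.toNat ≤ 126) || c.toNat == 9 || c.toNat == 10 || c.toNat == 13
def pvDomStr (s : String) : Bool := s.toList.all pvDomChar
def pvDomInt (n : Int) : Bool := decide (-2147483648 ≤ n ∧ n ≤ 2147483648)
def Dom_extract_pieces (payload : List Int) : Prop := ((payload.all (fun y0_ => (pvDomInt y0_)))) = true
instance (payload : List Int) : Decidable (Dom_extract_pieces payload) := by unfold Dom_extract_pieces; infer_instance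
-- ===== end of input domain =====

-- B replaces A's nested per-byte shift loop by a 256-entry table of piece-offset lists
-- (built once by DP on v >> 1) and a single flat lookup pass: alternative algorithm.


-- ===== PORT A =====
def extract_pieces (payload : List Int) : List Int :=
  (payload.foldl (fun (acc : PySem.Set Int × Int) byte_value =>
      ((PySem.List.pyRange 0 8 1).foldl (fun bp j =>
          if PySem.Int.band (byte_value >>> (j.toNat : Int)) 1 ≠ 0 then
            PySem.Set.add bp (acc.2 * 8 + 7 - j)
          else bp) acc.1,
       acc.2 + 1))
    ((PySem.Set.empty : PySem.Set Int), (0 : Int))).1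

-- ===== PORT B =====
-- the table build of Source B: OFF = [[]]; for v in range(1, 256): OFF.append(...)
-- OFF[v >> 1] is ported with pyGetD (total form): 0 ≤ v >> 1 < len OFF always holds here
def pvOffTable : List (List Int) :=
  (PySem.List.pyRange 1 256 1).foldl (fun t v =>
      t ++ [(if PySem.Int.band v 1 ≠ 0 then [(7 : Int)] else []) ++
            (PySem.List.pyGetD t (v >>> (1 : Int)) []).map (fun o => o - 1)])
    [[]]

-- the set comprehension of Source B: {8*i + o for i, b in enumerate(payload) for o in OFF[b & 0xFF]}
def extract_pieces_alt (payload : List Int) : List Int :=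
  (PySem.List.enumerate payload).foldl (fun (s : PySem.Set Int) p =>
      (PySem.List.pyGetD pvOffTable (PySem.Int.band p.2 255) []).foldl
        (fun s o => PySem.Set.add s (8 * p.1 + o)) s)
    (PySem.Set.empty : PySem.Set Int)

-- ===== PRECONDITION & SPEC =====
def Spec_extract_pieces (payload : List Int) (out : List Int) : Prop := out = extract_pieces_alt payload
instance (payload : List Int) (out : List Int) : Decidable (Spec_extract_pieces payload out) := by unfold Spec_extract_pieces; infer_instance

-- ===== CLAIM (what is proved, stated in full; the proofs are below) =====
def Claim_equal_extract_pieces : Prop := ∀ (payload : List Int), Dom_extract_pieces payload → Spec_extract_pieces payload (extract_pieces payload)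

-- ===== LEMMAS AND PROOFS =====

-- bit positions (ascending) that A's inner loop finds set in a byte value
def pvAOffs (m : Int) : List Int :=
  (PySem.List.pyRange 0 8 1).filter (fun j => decide (PySem.Int.band (m >>> (j.toNat : Int)) 1 ≠ 0))

-- a conditional-add fold is the plain fold of the filtered, mapped list
theorem pv_foldl_set_add_if (L : List Int) (c : Int → Prop) [DecidablePred c] (f : Int → Int) :
    ∀ s : PySem.Set Int,
      L.foldl (fun bp j => if c j then PySem.Set.add bp (f j) else bp) s
        = ((L.filter (fun j => decide (c j))).map f).foldl PySem.Set.add s := by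
  induction L with
  | nil => intro s; rfl
  | cons x xs ih =>
    intro s
    by_cases hx : c x <;> simp [hx, ih]

theorem pv_nat_and255 (n : Nat) : n &&& 255 = n % 256 := by
  have h := Nat.and_two_pow_sub_one_eq_mod n 8
  norm_num at h
  exact h

-- the masked byte is the byte mod 256
theorem pv_band255 (a : Int) : PySem.Int.band a 255 = a % 256 := by
  unfold PySem.Int.band
  by_cases ha : 0 ≤ a
  · simp only [ha, if_true]
    rw [show ((255:Int).toNat) = 255 from rfl, pv_nat_and255]
    omega
  · simp only [ha, if_false, if_true, show (0:Int) ≤ 255 by norm_num]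
    rw [show ((255:Int).toNat) = 255 from rfl, Nat.and_comm, pv_nat_and255]
    omega

-- A's bit tests only see the low 8 bits of the byte value
theorem pvAOffs_mod (m : Int) : pvAOffs m = pvAOffs (m % 256) := by
  unfold pvAOffs
  apply List.filter_congr
  intro j hj
  have hrange : PySem.List.pyRange 0 8 1 = [0, 1, 2, 3, 4, 5, 6, 7] := by decide
  rw [hrange] at hj
  have key : PySem.Int.band (m >>> (j.toNat : Int)) 1
      = PySem.Int.band ((m % 256) >>> (j.toNat : Int)) 1 := by
    fin_cases hj <;>
    · simp only [PySem.Int.band_one]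
      rw [PySem.Int.mod_eq_emod_of_pos (by norm_num),
          PySem.Int.mod_eq_emod_of_pos (by norm_num),
          Int.shiftRight_natCast_right, Int.shiftRight_natCast_right,
          Int.shiftRight_eq_div_pow, Int.shiftRight_eq_div_pow]
      norm_num [show Int.toNat 0 = 0 from rfl, show Int.toNat 1 = 1 from rfl,
        show Int.toNat 2 = 2 from rfl, show Int.toNat 3 = 3 from rfl,
        show Int.toNat 4 = 4 from rfl, show Int.toNat 5 = 5 from rfl,
        show Int.toNat 6 = 6 from rfl, show Int.toNat 7 = 7 from rfl]
      try omega
  simp only [key]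

-- finite check: B's DP table holds, for each byte value, exactly A's ascending
-- set-bit positions mapped through j ↦ 7 - j
set_option maxRecDepth 16384 in
theorem pvOffTable_eq :
    pvOffTable = (List.range 256).map (fun v : Nat => (pvAOffs (v : Int)).map (fun j => 7 - j)) := by
  decide

theorem pvOffTable_lookup (r : Int) (h0 : 0 ≤ r) (h1 : r < 256) :
    PySem.List.pyGetD pvOffTable r [] = (pvAOffs r).map (fun j => 7 - j) := by
  rw [PySem.List.pyGetD_of_nonneg _ _ h0, pvOffTable_eq,
      PySem.List.getD_map_range _ _ _ _ (by omega : r.toNat < 256),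
      Int.toNat_of_nonneg h0]

-- per byte, A's inner loop and B's table-lookup fold add the same elements in the same order
theorem pv_byte_eq (byte_value : Int) (i : Int) (s : PySem.Set Int) :
    (PySem.List.pyRange 0 8 1).foldl (fun bp j =>
        if PySem.Int.band (byte_value >>> (j.toNat : Int)) 1 ≠ 0 then
          PySem.Set.add bp (i * 8 + 7 - j)
        else bp) s
      = (PySem.List.pyGetD pvOffTable (PySem.Int.band byte_value 255) []).foldl
          (fun s o => PySem.Set.add s (8 * i + o)) s := by
  rw [pv_foldl_set_add_if (PySem.List.pyRange 0 8 1)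
        (fun j => PySem.Int.band (byte_value >>> (j.toNat : Int)) 1 ≠ 0) (fun j => i * 8 + 7 - j),
      pv_band255,
      pvOffTable_lookup (byte_value % 256) (Int.emod_nonneg _ (by norm_num)) (by omega)]
  have hA : (PySem.List.pyRange 0 8 1).filter
      (fun j => decide (PySem.Int.band (byte_value >>> (j.toNat : Int)) 1 ≠ 0))
      = pvAOffs byte_value := rfl
  rw [hA, pvAOffs_mod, List.foldl_map, List.foldl_map]
  apply PySem.List.foldl_congr_mem
  intro t j _
  congr 1
  omega

-- the two outer folds agree when B enumerates from A's byte counter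
theorem pv_fold_eq (payload : List Int) :
    ∀ (s : PySem.Set Int) (i : Int),
      (payload.foldl (fun (acc : PySem.Set Int × Int) byte_value =>
          ((PySem.List.pyRange 0 8 1).foldl (fun bp j =>
              if PySem.Int.band (byte_value >>> (j.toNat : Int)) 1 ≠ 0 then
                PySem.Set.add bp (acc.2 * 8 + 7 - j)
              else bp) acc.1,
           acc.2 + 1)) (s, i)).1
        = (PySem.List.enumerate payload i).foldl (fun (s : PySem.Set Int) p =>
            (PySem.List.pyGetD pvOffTable (PySem.Int.band p.2 255) []).foldl
              (fun s o => PySem.Set.add s (8 * p.1 + o)) s) s := by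
  induction payload with
  | nil => intro s i; rfl
  | cons b bs ih =>
    intro s i
    rw [PySem.List.enumerate_cons]
    simp only [List.foldl_cons]
    rw [pv_byte_eq b i s]
    exact ih _ (i + 1)

-- ===== VERDICT (by name: the statement is the Claim_ definition above) =====
theorem extract_pieces_spec : Claim_equal_extract_pieces := by
  intro payload _
  unfold Spec_extract_pieces extract_pieces extract_pieces_alt
  exact pv_fold_eq payload PySem.Set.empty 0
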